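-- pv_equiv track=rewrite | github.com/kschuman/PortfolioCode | 7ggplot/ProjectDraft.py | get_roman
-- ===== SOURCE A (Python) =====
-- import string
-- import operator
--
-- def get_roman(list):
--     ct = {}
--     for c in list:
--         ct[c] = 0
--         for letter in c:
--             if letter in string.ascii_lowercase or letter in string.ascii_uppercase:
--                 ct[c] += 1
--     return max(ct.items(), key=operator.itemgetter(1))[0]
-- ===== SOURCE B (Python) =====
-- import string
--
-- def get_roman(list):
--     # single pass, running max; first maximum wins ties (strict > only replaces)
--     best = list[0]
--     best_count = sum(ch in string.ascii_letters for ch in best)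
--     for s in list[1:]:
--         c = sum(ch in string.ascii_letters for ch in s)
--         if c > best_count:
--             best, best_count = s, c
--     return best
-- ===== Notes on version B (the rewrite author's own statement) =====
-- stated objective: simpler
-- what changed: Replaces the build-a-dict-of-counts-then-max pass with a single running-max loop that keeps only the current best string and its ASCII-letter count (first maximum wins ties via strict >); no dict is built.
import Mathlib
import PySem

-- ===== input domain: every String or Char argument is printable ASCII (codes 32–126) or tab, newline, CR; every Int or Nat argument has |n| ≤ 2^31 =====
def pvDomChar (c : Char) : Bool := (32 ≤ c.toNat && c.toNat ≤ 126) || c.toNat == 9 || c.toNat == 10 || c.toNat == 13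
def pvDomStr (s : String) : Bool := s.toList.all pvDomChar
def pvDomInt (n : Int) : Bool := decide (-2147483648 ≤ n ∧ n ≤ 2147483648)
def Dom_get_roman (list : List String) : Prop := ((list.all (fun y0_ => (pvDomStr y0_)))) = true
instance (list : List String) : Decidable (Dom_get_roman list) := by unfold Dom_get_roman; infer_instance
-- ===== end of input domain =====

-- B replaces A's dict-of-counts + max pass by a single running-max loop (same cost; simpler, no dict); return-value equivalence on nonempty lists.


-- ===== PORT A =====
def pvAsciiLower : List Char := "abcdefghijklmnopqrstuvwxyz".toList
def pvAsciiUpper : List Char := "ABCDEFGHIJKLMNOPQRSTUVWXYZ".toList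

-- 'letter in string.ascii_lowercase' on a single character is exactly membership of that character
def pvCtStep (d : PySem.Dict String Int) (c : String) : PySem.Dict String Int :=
  c.toList.foldl
    (fun d' letter =>
      if letter ∈ pvAsciiLower ∨ letter ∈ pvAsciiUpper then d'.modify c 0 (· + 1) else d')
    (d.insert c 0)

def get_roman (list : List String) : String :=
  let ct := list.foldl pvCtStep PySem.Dict.empty
  match PySem.List.max? ct.items (fun p => p.2) with
  | some p => p.1
  | none => ""   -- Python's max raises ValueError here (empty list); excluded by Pre_

-- ===== PORT B =====
def pvAsciiLetters : List Char := "abcdefghijklmnopqrstuvwxyzABCDEFGHIJKLMNOPQRSTUVWXYZ".toList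

-- sum(ch in string.ascii_letters for ch in s)
def pvLetterCount (s : String) : Int :=
  s.toList.foldl (fun n ch => n + (if ch ∈ pvAsciiLetters then 1 else 0)) 0

def get_roman_alt (list : List String) : String :=
  match list with
  | [] => ""   -- Python's list[0] raises IndexError here; excluded by Pre_
  | b :: rest =>
    (rest.foldl
      (fun p s =>
        let c := pvLetterCount s
        if p.2 < c then (s, c) else p)
      (b, pvLetterCount b)).1

-- ===== PRECONDITION & SPEC =====
-- Pre_ excludes only the empty list, on which A's max raises ValueError (and B's list[0] raises IndexError).
def Pre_get_roman (list : List String) : Prop := list ≠ []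
instance (list : List String) : Decidable (Pre_get_roman list) := by unfold Pre_get_roman; infer_instance
def pvWitness_get_roman : List String := (["ab", "c"])

def Spec_get_roman (list : List String) (out : String) : Prop := out = get_roman_alt list
instance (list : List String) (out : String) : Decidable (Spec_get_roman list out) := by unfold Spec_get_roman; infer_instance

-- ===== CLAIM (what is proved, stated in full; the proofs are below) =====
def Claim_equal_get_roman : Prop := ∀ (list : List String), Dom_get_roman list → Pre_get_roman list → Spec_get_roman list (get_roman list)

-- ===== LEMMAS AND PROOFS =====

-- abbreviations used only by the proofs
def pvG (c : String) : String × Int := (c, pvLetterCount c)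

def pvStep (p : String × Int) (s : String) : String × Int :=
  if p.2 < pvLetterCount s then (s, pvLetterCount s) else p

def pvOptStep (acc : Option (String × Int)) (x : String × Int) : Option (String × Int) :=
  match acc with
  | none => some x
  | some m => if m.2 < x.2 then some x else some m

-- the two per-character letter tests agree
theorem pv_test_eq (l : Char) :
    (l ∈ pvAsciiLower ∨ l ∈ pvAsciiUpper) ↔ l ∈ pvAsciiLetters := by
  have h : pvAsciiLetters = pvAsciiLower ++ pvAsciiUpper := by decide
  rw [h, List.mem_append]

theorem pv_count_eq (cs : List Char) (v : Int) :
    cs.foldl (fun n l => if l ∈ pvAsciiLower ∨ l ∈ pvAsciiUpper then n + 1 else n) v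
      = cs.foldl (fun n ch => n + (if ch ∈ pvAsciiLetters then 1 else 0)) v := by
  induction cs generalizing v with
  | nil => rfl
  | cons l cs ih =>
    simp only [List.foldl_cons]
    by_cases h : l ∈ pvAsciiLetters
    · rw [if_pos ((pv_test_eq l).mpr h), if_pos h, ih]
    · rw [if_neg (fun hc => h ((pv_test_eq l).mp hc)), if_neg h, add_zero, ih]

-- A's inner loop over the characters of c only bumps key c
theorem pv_inner (cs : List Char) (d : PySem.Dict String Int) (c : String) (v : Int) :
    cs.foldl
        (fun d' letter =>
          if letter ∈ pvAsciiLower ∨ letter ∈ pvAsciiUpper then d'.modify c 0 (· + 1) else d')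
        (d.insert c v)
      = d.insert c (cs.foldl (fun n l => if l ∈ pvAsciiLower ∨ l ∈ pvAsciiUpper then n + 1 else n) v) := by
  induction cs generalizing v with
  | nil => rfl
  | cons l cs ih =>
    simp only [List.foldl_cons]
    by_cases h : l ∈ pvAsciiLower ∨ l ∈ pvAsciiUpper
    · rw [if_pos h, if_pos h, PySem.Dict.modify, PySem.Dict.getD_insert_self,
        PySem.Dict.insert_insert_self, ih]
    · rw [if_neg h, if_neg h, ih]

theorem pv_ctStep_eq : pvCtStep = fun d c => d.insert c (pvLetterCount c) := by
  funext d c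
  rw [pvCtStep, pv_inner, pv_count_eq, pvLetterCount]

theorem pv_contains_map (S : List String) (c : String) :
    PySem.Dict.contains (⟨S.map pvG⟩ : PySem.Dict String Int) c = decide (c ∈ S) := by
  simp only [PySem.Dict.contains, List.any_map]
  induction S with
  | nil => simp
  | cons a S ih =>
    simp only [List.any_cons, ih, List.mem_cons]
    have ha : ((fun p => p.1 == c) ∘ pvG) a = decide (c = a) := by
      simp only [Function.comp, pvG]
      by_cases h : a = c
      · subst h; simp
      · rw [beq_eq_false_iff_ne.mpr h, decide_eq_false (fun hh => h hh.symm)]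
    rw [ha, Bool.decide_or]

-- A's dict fold produces exactly the first-occurrence dedup, each keyed to its letter count
theorem pv_items (L S : List String) :
    (L.foldl (fun d c => d.insert c (pvLetterCount c)) (⟨S.map pvG⟩ : PySem.Dict String Int)).items
      = (PySem.Set.update S L).map pvG := by
  induction L generalizing S with
  | nil => rfl
  | cons c L ih =>
    simp only [List.foldl_cons]
    have hup : PySem.Set.update S (c :: L) = PySem.Set.update (PySem.Set.add S c) L := rfl
    by_cases h : c ∈ S
    · have hd : (⟨S.map pvG⟩ : PySem.Dict String Int).insert c (pvLetterCount c)
          = (⟨S.map pvG⟩ : PySem.Dict String Int) := by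
        apply PySem.Dict.ext
        rw [PySem.Dict.items_insert, if_pos (by rw [pv_contains_map]; exact decide_eq_true h)]
        show List.map _ (S.map pvG) = S.map pvG
        rw [List.map_map]
        apply List.map_congr_left
        intro x _
        by_cases hx : x = c
        · simp [pvG, hx]
        · simp [pvG, hx]
      rw [hd, hup, PySem.Set.add, if_pos ((PySem.Set.contains_iff S c).mpr h), ih]
    · have hd : (⟨S.map pvG⟩ : PySem.Dict String Int).insert c (pvLetterCount c)
          = (⟨(S ++ [c]).map pvG⟩ : PySem.Dict String Int) := by
        apply PySem.Dict.ext
        rw [PySem.Dict.items_insert, if_neg (by rw [pv_contains_map]; simp [h])]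
        simp [pvG]
      rw [hd, hup, PySem.Set.add,
        if_neg (fun hc => h ((PySem.Set.contains_iff S c).mp hc)), ih]

-- folding pvOptStep over already-dominated elements leaves the accumulator alone
theorem pv_dominated (S : List String) (p : String × Int)
    (hS : ∀ y ∈ S, pvLetterCount y ≤ p.2) :
    (S.map pvG).foldl pvOptStep (some p) = some p := by
  induction S with
  | nil => rfl
  | cons y S ih =>
    simp only [List.map_cons, List.foldl_cons]
    have hy : ¬ p.2 < pvLetterCount y := not_lt.mpr (hS y (by simp))
    show (S.map pvG).foldl pvOptStep (if p.2 < (pvG y).2 then some (pvG y) else some p) = some p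
    rw [pvG, if_neg hy]
    exact ih (fun z hz => hS z (by simp [hz]))

-- running max over the raw list = Python max over the dedup'd (key, count) items
theorem pv_main (L S : List String) (p : String × Int)
    (hp : p.2 = pvLetterCount p.1) (hS : ∀ y ∈ S, pvLetterCount y ≤ p.2) :
    ((PySem.Set.update S L).map pvG).foldl pvOptStep (some p) = some (L.foldl pvStep p) := by
  induction L generalizing S p with
  | nil =>
    show (S.map pvG).foldl pvOptStep (some p) = some p
    exact pv_dominated S p hS
  | cons c L ih =>
    have hup : PySem.Set.update S (c :: L) = PySem.Set.update (PySem.Set.add S c) L := rfl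
    rw [hup, List.foldl_cons]
    have hq : (pvStep p c).2 = pvLetterCount (pvStep p c).1 := by
      rw [pvStep]; split_ifs with h
      · rfl
      · exact hp
    have hmono : p.2 ≤ (pvStep p c).2 := by
      rw [pvStep]; split_ifs with h
      · exact le_of_lt h
      · exact le_refl _
    have hS' : ∀ y ∈ PySem.Set.add S c, pvLetterCount y ≤ (pvStep p c).2 := by
      intro y hy
      rw [PySem.Set.add] at hy
      split_ifs at hy with hc
      · exact le_trans (hS y hy) hmono
      · rcases List.mem_append.mp hy with h | h
        · exact le_trans (hS y h) hmono
        · have : y = c := by simpa using h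
          subst this
          rw [pvStep]; split_ifs with h2
          · exact le_refl _
          · exact not_lt.mp h2
    -- replay the fold over the prefix (add S c) from both starting accumulators
    have key : ∀ (T : List String),
        (((PySem.Set.add S c) ++ T).map pvG).foldl pvOptStep (some p)
          = (((PySem.Set.add S c) ++ T).map pvG).foldl pvOptStep (some (pvStep p c)) := by
      intro T
      rw [List.map_append, List.foldl_append, List.foldl_append]
      congr 1
      have h2 : ((PySem.Set.add S c).map pvG).foldl pvOptStep (some (pvStep p c))
          = some (pvStep p c) := pv_dominated _ _ hS'
      rw [h2, PySem.Set.add]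
      split_ifs with hc
      · rw [pv_dominated S p hS, pvStep,
          if_neg (not_lt.mpr (hS c (by simpa using hc)))]
      · rw [List.map_append, List.foldl_append, pv_dominated S p hS]
        show pvOptStep (some p) (pvG c) = some (pvStep p c)
        rw [pvOptStep, pvStep, pvG]
        split_ifs with h2 <;> rfl
    have hsplit := PySem.Set.update_eq_append_filter (PySem.Set.add S c) L
    rw [hsplit, key, ← hsplit, ih (PySem.Set.add S c) (pvStep p c) hq hS']

theorem pv_max?_eq (xs : List (String × Int)) :
    PySem.List.max? xs (fun p => p.2) = xs.foldl pvOptStep none := by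
  rw [PySem.List.max?]
  apply PySem.List.foldl_congr_mem
  intro acc x _
  cases acc <;> rfl

-- ===== VERDICT (by name: the statement is the Claim_ definition above) =====
theorem get_roman_spec : Claim_equal_get_roman := by
  intro list _ hpre
  match list with
  | [] => exact absurd rfl hpre
  | b :: rest =>
    show get_roman (b :: rest) = get_roman_alt (b :: rest)
    rw [get_roman]
    have hct : ((b :: rest).foldl pvCtStep PySem.Dict.empty).items
        = (PySem.Set.update [b] rest).map pvG := by
      rw [pv_ctStep_eq]
      have : (PySem.Dict.empty : PySem.Dict String Int)
          = (⟨([] : List String).map pvG⟩ : PySem.Dict String Int) := rfl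
      rw [this, pv_items]
      rfl
    rw [hct, pv_max?_eq]
    have hmain := pv_main rest [b] (b, pvLetterCount b) rfl
      (by intro y hy; simp at hy; subst hy; exact le_refl _)
    have hsplit := PySem.Set.update_eq_append_filter ([b] : PySem.Set String) rest
    have hstart : ((PySem.Set.update [b] rest).map pvG).foldl pvOptStep none
        = ((PySem.Set.update [b] rest).map pvG).foldl pvOptStep (some (b, pvLetterCount b)) := by
      rw [hsplit]
      show ((b :: _).map pvG).foldl pvOptStep none = ((b :: _).map pvG).foldl pvOptStep _
      simp only [List.map_cons, List.foldl_cons]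
      show List.foldl pvOptStep (some (pvG b)) _
          = List.foldl pvOptStep (pvOptStep (some (b, pvLetterCount b)) (pvG b)) _
      rw [pvOptStep, pvG]
      rw [if_neg (lt_irrefl _)]
    rw [hstart, hmain]
    show (rest.foldl pvStep (b, pvLetterCount b)).1 = get_roman_alt (b :: rest)
    rw [get_roman_alt]
    exact congrArg Prod.fst (PySem.List.foldl_congr_mem rest _ _ _ (fun p s _ => rfl))
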